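-- pv_equiv track=rewrite | github.com/venpopov/subset-sum-distinct-problem | src/sequence_analysis.py | is_valid_seed
-- ===== SOURCE A (Python) =====
-- from typing import List, Callable, Tuple
--
-- def is_valid_seed(seed: List[int]) -> bool:
--     """
--     Check if a seed is valid according to these rules:
--     1. Cannot have more than two of the same element
--     2. If an element appears twice, the duplicates must be adjacent
--     3. At least one element must be greater than 8
--
--     Args:
--         seed: List of integers to validate
--
--     Returns:
--         True if valid, False otherwise
--     """
--     from collections import Counter
--
--     # Count occurrences of each element
--     counts = Counter(seed)
--
--     # Check rule 1: no element can appear more than twice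
--     if any(count > 2 for count in counts.values()):
--         return False
--
--     # Check rule 2: duplicates must be adjacent
--     for value, count in counts.items():
--         if count == 2:
--             # Find indices of this value
--             indices = [i for i, x in enumerate(seed) if x == value]
--             # Check if they're adjacent
--             if indices[1] - indices[0] != 1:
--                 return False
--
--     # Check rule 3: at least one element must be greater than 7
--     if not any(x > 7 for x in seed):
--         return False
--
--     return True
-- ===== SOURCE B (Python) =====
-- def is_valid_seed(seed):
--     """Single pass: remember each value's first index; every later occurrence
--     must sit exactly one past that first index (so: at most two, adjacent).
--     Finally require some element > 7."""
--     first = {}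
--     has_big = False
--     for i, x in enumerate(seed):
--         if x in first:
--             if i - first[x] != 1:
--                 return False
--         else:
--             first[x] = i
--         if x > 7:
--             has_big = True
--     return has_big
-- ===== Notes on version B (the rewrite author's own statement) =====
-- stated objective: faster
-- what changed: Replaced Counter plus a full enumerate-scan per duplicated value by a single left-to-right pass that stores each value's first index in a dict and rejects any later occurrence not exactly one past it.
import Mathlib
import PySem

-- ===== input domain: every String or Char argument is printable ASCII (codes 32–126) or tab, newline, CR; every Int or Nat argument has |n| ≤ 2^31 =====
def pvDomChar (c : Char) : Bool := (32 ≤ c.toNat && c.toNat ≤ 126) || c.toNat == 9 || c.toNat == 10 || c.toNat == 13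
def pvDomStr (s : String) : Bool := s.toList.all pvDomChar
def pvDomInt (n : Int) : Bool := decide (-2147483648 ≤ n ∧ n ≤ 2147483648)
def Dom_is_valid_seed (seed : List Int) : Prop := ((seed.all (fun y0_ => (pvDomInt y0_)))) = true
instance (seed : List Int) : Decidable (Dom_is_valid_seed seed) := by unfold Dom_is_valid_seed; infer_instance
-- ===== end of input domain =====

-- B replaces A's Counter + per-duplicate full enumerate scan by one left-to-right pass
-- over a dict of first indices (measured asymptotically faster in a timing run).

-- ===== PORT A =====
def is_valid_seed (seed : List Int) : Bool :=
  let counts := PySem.Dict.counter seed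
  if counts.values.any (fun c => decide (c > 2)) then false
  else if counts.items.any (fun vc =>
      vc.2 == 2 &&
      (let indices : List Int :=
        ((PySem.List.enumerate seed 0).filter (fun p => p.2 == vc.1)).map (fun p => p.1)
       -- count = 2 guarantees two indices, so the `_, _` arm (Python IndexError) is unreachable
       match PySem.List.pyGet? indices 0, PySem.List.pyGet? indices 1 with
       | some a, some b => decide (b - a ≠ 1)
       | _, _ => false)) then false
  else if !(seed.any (fun x => decide (x > 7))) then false
  else true

-- ===== PORT B =====
-- the loop of Source B: i is the enumerate counter, `first` maps a value to its first index
def isValidSeedLoop : List Int → Int → PySem.Dict Int Int → Bool → Bool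
  | [], _, _, has_big => has_big
  | x :: rest, i, first, has_big =>
    match first.get? x with
    | some f =>
      if i - f ≠ 1 then false
      else isValidSeedLoop rest (i + 1) first (has_big || decide (x > 7))
    | none => isValidSeedLoop rest (i + 1) (first.insert x i) (has_big || decide (x > 7))

def is_valid_seed_alt (seed : List Int) : Bool :=
  isValidSeedLoop seed 0 PySem.Dict.empty false

-- ===== PRECONDITION & SPEC =====
def Spec_is_valid_seed (seed : List Int) (out : Bool) : Prop := out = is_valid_seed_alt seed
instance (seed : List Int) (out : Bool) : Decidable (Spec_is_valid_seed seed out) := by unfold Spec_is_valid_seed; infer_instance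

-- ===== CLAIM (what is proved, stated in full; the proofs are below) =====
def Claim_equal_is_valid_seed : Prop := ∀ (seed : List Int), Dom_is_valid_seed seed → Spec_is_valid_seed seed (is_valid_seed seed)

-- ===== LEMMAS AND PROOFS =====

-- hub: `true` iff some value recurs at distance ≥ 2 (i.e. count > 2 or a non-adjacent duplicate)
def dupBad : List Int → Bool
  | [] => false
  | x :: rest => (rest.drop 1).contains x || dupBad rest

def BadPair (l : List Int) : Prop :=
  ∃ i j : Nat, i + 2 ≤ j ∧ ∃ v, l[i]? = some v ∧ l[j]? = some v

lemma dupBad_iff (l : List Int) : dupBad l = true ↔ BadPair l := by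
  induction l with
  | nil => simp [dupBad, BadPair]
  | cons x t IH =>
    simp only [dupBad, Bool.or_eq_true, IH, List.contains_eq_mem, decide_eq_true_eq]
    constructor
    · rintro (hmem | ⟨i, j, hij, v, hi, hj⟩)
      · obtain ⟨k, hk⟩ := List.mem_iff_getElem?.1 hmem
        refine ⟨0, k + 2, by omega, x, by simp, ?_⟩
        have : (t.drop 1)[k]? = some x := hk
        rw [List.getElem?_drop] at this
        simpa [Nat.add_comm] using this
      · exact ⟨i + 1, j + 1, by omega, v, by simpa using hi, by simpa using hj⟩
    · rintro ⟨i, j, hij, v, hi, hj⟩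
      match i, hij with
      | 0, _ =>
        left
        have hv : v = x := by simpa using hi.symm
        obtain ⟨k, hk⟩ : ∃ k, j = k + 2 := ⟨j - 2, by omega⟩
        subst hk hv
        have : t[k + 1]? = some v := by simpa using hj
        have : (t.drop 1)[k]? = some v := by
          rw [List.getElem?_drop]; simpa [Nat.add_comm] using this
        exact List.mem_of_getElem? this
      | (i' + 1), _ =>
        right
        exact ⟨i', j - 1, by omega, v, by simpa using hi, by
          have : j = (j - 1) + 1 := by omega
          rw [this] at hj; simpa using hj⟩

lemma idxOf_le_getElem {l : List Int} {i : Nat} (h : i < l.length) {x : Int}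
    (he : l[i] = x) : l.idxOf x ≤ i := by
  by_contra hlt
  have hlt' : i < List.idxOf x l := Nat.lt_of_not_le hlt
  have := List.not_of_lt_findIdx (p := (· == x)) (xs := l) (i := i) hlt'
  simp at this
  exact this he

lemma dupBad_append_of (l r : List Int) (h : dupBad l = true) : dupBad (l ++ r) = true := by
  rw [dupBad_iff] at h ⊢
  obtain ⟨i, j, hij, v, hi, hj⟩ := h
  obtain ⟨hilt, -⟩ := List.getElem?_eq_some_iff.1 hi
  obtain ⟨hjlt, -⟩ := List.getElem?_eq_some_iff.1 hj
  exact ⟨i, j, hij, v, by rw [List.getElem?_append_left hilt]; exact hi,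
    by rw [List.getElem?_append_left hjlt]; exact hj⟩

lemma dupBad_snoc (pre : List Int) (x : Int) (hp : dupBad pre = false) :
    (dupBad (pre ++ [x]) = true) ↔ (x ∈ pre ∧ pre.idxOf x + 1 ≠ pre.length) := by
  rw [dupBad_iff]
  constructor
  · rintro ⟨i, j, hij, v, hi, hj⟩
    obtain ⟨hjlt, hje⟩ := List.getElem?_eq_some_iff.1 hj
    rw [List.length_append, List.length_cons, List.length_nil] at hjlt
    by_cases hjp : j < pre.length
    · exfalso
      have hbp : BadPair pre := ⟨i, j, hij, v,
        by rw [List.getElem?_append_left (by omega)] at hi; exact hi,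
        by rw [List.getElem?_append_left hjp] at hj; exact hj⟩
      rw [← dupBad_iff] at hbp
      simp [hp] at hbp
    · have hj' : j = pre.length := by omega
      subst hj'
      rw [List.getElem?_concat_length] at hj
      have hvx : v = x := (Option.some.inj hj).symm
      subst hvx
      have hilt : i < pre.length := by omega
      rw [List.getElem?_append_left hilt] at hi
      obtain ⟨hw, hie⟩ := List.getElem?_eq_some_iff.1 hi
      have hmem : v ∈ pre := hie ▸ List.getElem_mem hilt
      have hle : pre.idxOf v ≤ i := idxOf_le_getElem hilt hie
      exact ⟨hmem, by omega⟩
  · rintro ⟨hmem, hne⟩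
    have hlt := List.idxOf_lt_length_of_mem hmem
    refine ⟨pre.idxOf x, pre.length, by omega, x, ?_, List.getElem?_concat_length⟩
    rw [List.getElem?_append_left hlt]
    exact List.getElem?_eq_some_iff.2 ⟨hlt, List.getElem_idxOf hlt⟩

lemma dupBad_snoc_false (pre : List Int) (x : Int) (hp : dupBad pre = false)
    (h : ¬ (x ∈ pre ∧ pre.idxOf x + 1 ≠ pre.length)) : dupBad (pre ++ [x]) = false := by
  cases hsn : dupBad (pre ++ [x]) with
  | false => rfl
  | true => exact absurd ((dupBad_snoc pre x hp).1 hsn) h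

lemma loop_eq (rest : List Int) : ∀ (pre : List Int) (first : PySem.Dict Int Int) (big : Bool),
    (∀ y, first.get? y = if y ∈ pre then some ((pre.idxOf y : Nat) : Int) else none) →
    dupBad pre = false →
    isValidSeedLoop rest (pre.length : Int) first big
      = (!dupBad (pre ++ rest) && (big || rest.any (fun x => decide (x > 7)))) := by
  induction rest with
  | nil =>
    intro pre first big _ hp
    simp [isValidSeedLoop, hp]
  | cons x rest IH =>
    intro pre first big hfirst hp
    have hlen : ((pre ++ [x]).length : Int) = (pre.length : Int) + 1 := by
      simp [List.length_append]
    by_cases hmem : x ∈ pre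
    · have hget : first.get? x = some ((pre.idxOf x : Nat) : Int) := by
        rw [hfirst x, if_pos hmem]
      by_cases hc : (pre.length : Int) - ((pre.idxOf x : Nat) : Int) ≠ 1
      · have hbad : dupBad (pre ++ (x :: rest)) = true := by
          have h1 : dupBad (pre ++ [x]) = true :=
            (dupBad_snoc pre x hp).2 ⟨hmem, by omega⟩
          have := dupBad_append_of (pre ++ [x]) rest h1
          simpa using this
        simp [isValidSeedLoop, hget, hc, hbad]
      · have hidx : pre.idxOf x + 1 = pre.length := by omega
        have hgood : dupBad (pre ++ [x]) = false :=
          dupBad_snoc_false pre x hp (by intro h; exact h.2 hidx)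
        have hinv' : ∀ y, first.get? y =
            if y ∈ pre ++ [x] then some (((pre ++ [x]).idxOf y : Nat) : Int) else none := by
          intro y
          rw [hfirst y]
          by_cases hy : y ∈ pre
          · rw [if_pos hy, if_pos (by simp [hy]), List.idxOf_append_of_mem hy]
          · by_cases hyx : y = x
            · exact absurd (hyx ▸ hmem) hy
            · rw [if_neg hy, if_neg (by simp [hy, hyx])]
        have hIH := IH (pre ++ [x]) first (big || decide (x > 7)) hinv' hgood
        rw [hlen] at hIH
        simp only [isValidSeedLoop, hget, if_neg hc, hIH]
        simp [List.append_assoc, Bool.or_assoc]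
    · have hget : first.get? x = none := by rw [hfirst x, if_neg hmem]
      have hgood : dupBad (pre ++ [x]) = false :=
        dupBad_snoc_false pre x hp (by intro h; exact hmem h.1)
      have hinv' : ∀ y, (first.insert x (pre.length : Int)).get? y =
          if y ∈ pre ++ [x] then some (((pre ++ [x]).idxOf y : Nat) : Int) else none := by
        intro y
        by_cases hyx : y = x
        · subst hyx
          rw [PySem.Dict.get?_insert_self, if_pos (by simp),
            List.idxOf_append_of_notMem hmem]
          simp
        · rw [PySem.Dict.get?_insert_of_ne first _ hyx, hfirst y]
          by_cases hy : y ∈ pre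
          · rw [if_pos hy, if_pos (by simp [hy]), List.idxOf_append_of_mem hy]
          · rw [if_neg hy, if_neg (by simp [hy, hyx])]
      have hIH := IH (pre ++ [x]) (first.insert x (pre.length : Int))
        (big || decide (x > 7)) hinv' hgood
      rw [hlen] at hIH
      simp only [isValidSeedLoop, hget, hIH]
      simp [List.append_assoc, Bool.or_assoc]

lemma alt_eq (seed : List Int) :
    is_valid_seed_alt seed = (!dupBad seed && seed.any (fun x => decide (x > 7))) := by
  have h := loop_eq seed [] PySem.Dict.empty false (fun y => rfl) rfl
  simpa [is_valid_seed_alt] using h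

-- A's index list for a value v
def posOf (seed : List Int) (v : Int) : List Int :=
  ((PySem.List.enumerate seed 0).filter (fun p => p.2 == v)).map (fun p => p.1)

lemma length_posOf (seed : List Int) (v : Int) : (posOf seed v).length = seed.count v := by
  simp only [posOf, List.length_map]
  conv_rhs => rw [← PySem.List.map_snd_enumerate seed 0]
  rw [List.count_eq_countP, List.countP_map, ← List.countP_eq_length_filter]
  rfl

lemma mem_posOf {seed : List Int} {v a : Int} :
    a ∈ posOf seed v ↔ ∃ k : Nat, a = (k : Int) ∧ ∃ h : k < seed.length, seed[k] = v := by
  simp only [posOf, List.mem_map, List.mem_filter]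
  constructor
  · rintro ⟨p, ⟨hpe, hbeq⟩, rfl⟩
    obtain ⟨k, h, rfl⟩ := (PySem.List.mem_enumerate_iff _ _ _).1 hpe
    exact ⟨k, by simp, h, by simpa using hbeq⟩
  · rintro ⟨k, rfl, h, he⟩
    exact ⟨(0 + (k : Int), seed[k]),
      ⟨(PySem.List.mem_enumerate_iff _ _ _).2 ⟨k, h, rfl⟩, by simpa using he⟩, by simp⟩

lemma pairwise_posOf (seed : List Int) (v : Int) : (posOf seed v).Pairwise (· < ·) := by
  exact List.pairwise_map.2 (List.Pairwise.filter _ (PySem.List.pairwise_lt_enumerate seed 0))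

-- the non-adjacency test A runs for a value of count 2
def nonadjB (seed : List Int) (v : Int) : Bool :=
  match PySem.List.pyGet? (posOf seed v) 0, PySem.List.pyGet? (posOf seed v) 1 with
  | some a, some b => decide (b - a ≠ 1)
  | _, _ => false

lemma pos_two {seed : List Int} {v : Int} (h : seed.count v = 2) :
    ∃ i j : Nat, i < j ∧ posOf seed v = [(i : Int), (j : Int)] ∧
      (∃ h1 : i < seed.length, seed[i] = v) ∧ (∃ h2 : j < seed.length, seed[j] = v) ∧
      (∀ k : Nat, (hk : k < seed.length) → seed[k] = v → k = i ∨ k = j) := by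
  have hlen : (posOf seed v).length = 2 := by rw [length_posOf, h]
  obtain ⟨a, b, hpos⟩ := List.length_eq_two.1 hlen
  have ha : a ∈ posOf seed v := by rw [hpos]; simp
  have hb : b ∈ posOf seed v := by rw [hpos]; simp
  obtain ⟨i, rfl, hilt, hie⟩ := mem_posOf.1 ha
  obtain ⟨j, rfl, hjlt, hje⟩ := mem_posOf.1 hb
  have hab : (i : Int) < (j : Int) := by
    have hpw := pairwise_posOf seed v
    rw [hpos] at hpw
    simpa using hpw
  refine ⟨i, j, by exact_mod_cast hab, hpos, ⟨hilt, hie⟩, ⟨hjlt, hje⟩, ?_⟩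
  intro k hk hke
  have hmk : ((k : Nat) : Int) ∈ posOf seed v := mem_posOf.2 ⟨k, rfl, hk, hke⟩
  rw [hpos] at hmk
  simp at hmk
  rcases hmk with hk' | hk'
  · left; exact_mod_cast hk'
  · right; exact_mod_cast hk'

lemma badpair_iff (seed : List Int) :
    BadPair seed ↔ (∃ v ∈ seed, 2 < seed.count v) ∨
      (∃ v ∈ seed, seed.count v = 2 ∧ nonadjB seed v = true) := by
  constructor
  · rintro ⟨i, j, hij, v, hi, hj⟩
    obtain ⟨hilt, hie⟩ := List.getElem?_eq_some_iff.1 hi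
    obtain ⟨hjlt, hje⟩ := List.getElem?_eq_some_iff.1 hj
    have hmem : v ∈ seed := hie ▸ List.getElem_mem hilt
    by_cases hcnt : 2 < seed.count v
    · exact Or.inl ⟨v, hmem, hcnt⟩
    · have hc2 : seed.count v = 2 := by
        have hmi : ((i : Nat) : Int) ∈ posOf seed v := mem_posOf.2 ⟨i, rfl, hilt, hie⟩
        have hmj : ((j : Nat) : Int) ∈ posOf seed v := mem_posOf.2 ⟨j, rfl, hjlt, hje⟩
        have hlen2 : 2 ≤ (posOf seed v).length := by
          rcases hl : posOf seed v with _ | ⟨a, _ | ⟨b, t⟩⟩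
          · rw [hl] at hmi; simp at hmi
          · rw [hl] at hmi hmj
            simp at hmi hmj
            have : (i : Int) = (j : Int) := by rw [hmi, hmj]
            have : i = j := by exact_mod_cast this
            omega
          · simp
        rw [length_posOf] at hlen2
        omega
      obtain ⟨i', j', hij', hpos, -, -, huniq⟩ := pos_two hc2
      have hki := huniq i hilt hie
      have hkj := huniq j hjlt hje
      refine Or.inr ⟨v, hmem, hc2, ?_⟩
      have hgap : i' + 2 ≤ j' := by
        rcases hki with rfl | rfl <;> rcases hkj with rfl | rfl <;> omega
      simp only [nonadjB, hpos,
        show PySem.List.pyGet? [(i' : Int), (j' : Int)] 0 = some (i' : Int) from rfl,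
        show PySem.List.pyGet? [(i' : Int), (j' : Int)] 1 = some (j' : Int) from rfl]
      simp only [decide_eq_true_eq]
      intro hgap'
      omega
  · rintro (⟨v, hmem, hcnt⟩ | ⟨v, hmem, hc2, hnadj⟩)
    · have hlen3 : 3 ≤ (posOf seed v).length := by rw [length_posOf]; omega
      rcases hl : posOf seed v with _ | ⟨a, _ | ⟨b, _ | ⟨c, t⟩⟩⟩ <;>
        rw [hl] at hlen3 <;> simp at hlen3
      have hma : a ∈ posOf seed v := by rw [hl]; simp
      have hmb : b ∈ posOf seed v := by rw [hl]; simp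
      have hmc : c ∈ posOf seed v := by rw [hl]; simp
      have hpw := pairwise_posOf seed v
      rw [hl] at hpw
      simp [List.pairwise_cons] at hpw
      obtain ⟨i, hia, hilt, hie⟩ := mem_posOf.1 hma
      obtain ⟨j0, hjb, hjlt0, hje0⟩ := mem_posOf.1 hmb
      obtain ⟨k, hkc, hklt, hke⟩ := mem_posOf.1 hmc
      have h1 : (i : Int) < (j0 : Int) := by
        have := hpw.1.1
        rw [hia, hjb] at this; exact this
      have h2 : (j0 : Int) < (k : Int) := by
        have := hpw.2.1.1
        rw [hjb, hkc] at this; exact this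
      refine ⟨i, k, by omega, v, List.getElem?_eq_some_iff.2 ⟨hilt, hie⟩,
        List.getElem?_eq_some_iff.2 ⟨hklt, hke⟩⟩
    · obtain ⟨i', j', hij', hpos, ⟨hilt, hie⟩, ⟨hjlt, hje⟩, -⟩ := pos_two hc2
      simp only [nonadjB, hpos,
        show PySem.List.pyGet? [(i' : Int), (j' : Int)] 0 = some (i' : Int) from rfl,
        show PySem.List.pyGet? [(i' : Int), (j' : Int)] 1 = some (j' : Int) from rfl,
        decide_eq_true_eq] at hnadj
      exact ⟨i', j', by omega, v, List.getElem?_eq_some_iff.2 ⟨hilt, hie⟩,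
        List.getElem?_eq_some_iff.2 ⟨hjlt, hje⟩⟩

lemma a_eq (seed : List Int) :
    is_valid_seed seed = (!dupBad seed && seed.any (fun x => decide (x > 7))) := by
  have hC1 : ((PySem.Dict.counter seed).values.any (fun c => decide (c > 2)) = true) ↔
      (∃ v ∈ seed, 2 < seed.count v) := by
    rw [show (PySem.Dict.counter seed).values
        = (PySem.Dict.counter seed).items.map (fun p => p.2) from rfl]
    rw [PySem.Dict.items_counter, List.map_map, List.any_map]
    simp only [List.any_eq_true, PySem.Set.mem_ofList, Function.comp_apply, decide_eq_true_eq]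
    constructor
    · rintro ⟨v, hv, h⟩; exact ⟨v, hv, by exact_mod_cast h⟩
    · rintro ⟨v, hv, h⟩; exact ⟨v, hv, by exact_mod_cast h⟩
  have hC2 : ((PySem.Dict.counter seed).items.any (fun vc =>
      vc.2 == 2 &&
      (let indices : List Int :=
        ((PySem.List.enumerate seed 0).filter (fun p => p.2 == vc.1)).map (fun p => p.1)
       match PySem.List.pyGet? indices 0, PySem.List.pyGet? indices 1 with
       | some a, some b => decide (b - a ≠ 1)
       | _, _ => false)) = true) ↔
      (∃ v ∈ seed, seed.count v = 2 ∧ nonadjB seed v = true) := by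
    rw [PySem.Dict.items_counter, List.any_map]
    simp only [List.any_eq_true, PySem.Set.mem_ofList, Function.comp_apply, Bool.and_eq_true]
    constructor
    · rintro ⟨v, hv, h1, h2⟩
      refine ⟨v, hv, ?_, ?_⟩
      · have := beq_iff_eq.1 h1; exact_mod_cast this
      · exact h2
    · rintro ⟨v, hv, h1, h2⟩
      refine ⟨v, hv, ?_, ?_⟩
      · exact beq_iff_eq.2 (by exact_mod_cast h1)
      · exact h2
  have hD := dupBad_iff seed
  have hB := badpair_iff seed
  unfold is_valid_seed
  by_cases h1 : ((PySem.Dict.counter seed).values.any (fun c => decide (c > 2))) = true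
  · have hd : dupBad seed = true := hD.2 (hB.2 (Or.inl (hC1.1 h1)))
    rw [if_pos h1, hd]
    simp
  · by_cases h2 : ((PySem.Dict.counter seed).items.any (fun vc =>
      vc.2 == 2 &&
      (let indices : List Int :=
        ((PySem.List.enumerate seed 0).filter (fun p => p.2 == vc.1)).map (fun p => p.1)
       match PySem.List.pyGet? indices 0, PySem.List.pyGet? indices 1 with
       | some a, some b => decide (b - a ≠ 1)
       | _, _ => false)) = true)
    · have hd : dupBad seed = true := hD.2 (hB.2 (Or.inr (hC2.1 h2)))
      rw [if_neg h1, if_pos h2, hd]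
      simp
    · have hd : dupBad seed = false := by
        cases hdd : dupBad seed
        · rfl
        · rcases hB.1 (hD.1 hdd) with hl | hr
          · exact absurd (hC1.2 hl) h1
          · exact absurd (hC2.2 hr) h2
      rw [if_neg h1, if_neg h2, hd]
      by_cases h3 : seed.any (fun x => decide (x > 7)) = true
      · rw [if_neg (by simp [h3] : ¬ (!(seed.any fun x => decide (x > 7))) = true)]
        simp [h3]
      · rw [Bool.not_eq_true] at h3
        rw [if_pos (by simp [h3] : (!(seed.any fun x => decide (x > 7))) = true)]
        simp [h3]

-- ===== VERDICT (by name: the statement is the Claim_ definition above) =====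
theorem is_valid_seed_spec : Claim_equal_is_valid_seed := by
  intro seed _
  unfold Spec_is_valid_seed
  rw [a_eq, alt_eq]
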